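-- pv_equiv track=rewrite | github.com/lindeb2/Apollo | PanTest/Test.py | filter_B_max_total_neighbor_pairs
-- ===== SOURCE A (Python) =====
-- def get_neighbors_diff(perm):
--     """Returns a list of absolute differences between neighbors."""
--     return [abs(perm[i] - perm[i + 1]) for i in range(len(perm) - 1)]
--
-- def filter_B_max_total_neighbor_pairs(candidates):
--     best_score = -1
--     scored_candidates = []
--
--     for perm in candidates:
--         diffs = get_neighbors_diff(perm)
--         total_diff = sum(diffs)
--
--         if total_diff > best_score:
--             best_score = total_diff
--             scored_candidates = [perm]
--         elif total_diff == best_score: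
--             scored_candidates.append(perm)
--
--     return scored_candidates
-- ===== SOURCE B (Python) =====
-- def filter_B_max_total_neighbor_pairs(candidates):
--     cands = list(candidates)
--     scores = [sum(abs(a - b) for a, b in zip(perm, perm[1:])) for perm in cands]
--     if not scores:
--         return []
--     m = max(scores)
--     return [perm for perm, s in zip(cands, scores) if s == m]
-- ===== Notes on version B (the rewrite author's own statement) =====
-- stated objective: simpler
-- what changed: Replaces the running-max loop with mutable reset/append state by a three-step decomposition: compute all scores, take max of the score list, filter the candidates whose score equals it.
import Mathlib
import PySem

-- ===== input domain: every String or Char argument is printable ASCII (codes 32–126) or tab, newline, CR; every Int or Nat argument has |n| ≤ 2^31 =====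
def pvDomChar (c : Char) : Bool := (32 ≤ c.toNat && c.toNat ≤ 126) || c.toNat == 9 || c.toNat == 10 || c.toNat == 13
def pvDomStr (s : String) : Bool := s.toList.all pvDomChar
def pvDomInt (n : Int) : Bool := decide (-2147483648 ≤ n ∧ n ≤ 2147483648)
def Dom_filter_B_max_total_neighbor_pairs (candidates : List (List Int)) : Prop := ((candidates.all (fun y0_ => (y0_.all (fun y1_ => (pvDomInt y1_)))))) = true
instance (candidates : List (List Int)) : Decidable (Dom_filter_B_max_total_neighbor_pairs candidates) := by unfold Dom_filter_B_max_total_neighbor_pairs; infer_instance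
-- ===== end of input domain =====

-- B replaces A's single running-max pass by score-list + max + filter (objective: simpler decomposition).

-- ===== PORT A =====
def get_neighbors_diff (perm : List Int) : List Int :=
  (PySem.List.pyRange 0 ((perm.length : Int) - 1) 1).map
    (fun i => |PySem.List.pyGetD perm i 0 - PySem.List.pyGetD perm (i + 1) 0|)

def filter_B_max_total_neighbor_pairs (candidates : List (List Int)) : List (List Int) :=
  (candidates.foldl
    (fun (st : Int × List (List Int)) perm =>
      let diffs := get_neighbors_diff perm
      let total_diff := diffs.sum
      if total_diff > st.1 then (total_diff, [perm])
      else if total_diff = st.1 then (st.1, st.2 ++ [perm])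
      else st)
    (-1, [])).2

-- ===== PORT B =====
def pvScoreB (perm : List Int) : Int :=
  ((perm.zip perm.tail).map (fun p => |p.1 - p.2|)).sum

def filter_B_max_total_neighbor_pairs_alt (candidates : List (List Int)) : List (List Int) :=
  let scores := candidates.map pvScoreB
  match PySem.List.max? scores (fun x => x) with
  | none => []
  | some m => ((candidates.zip scores).filter (fun p => decide (p.2 = m))).map Prod.fst

-- ===== PRECONDITION & SPEC =====
def Spec_filter_B_max_total_neighbor_pairs (candidates : List (List Int)) (out : List (List Int)) : Prop := out = filter_B_max_total_neighbor_pairs_alt candidates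
instance (candidates : List (List Int)) (out : List (List Int)) : Decidable (Spec_filter_B_max_total_neighbor_pairs candidates out) := by unfold Spec_filter_B_max_total_neighbor_pairs; infer_instance

-- ===== CLAIM (what is proved, stated in full; the proofs are below) =====
def Claim_equal_filter_B_max_total_neighbor_pairs : Prop := ∀ (candidates : List (List Int)), Dom_filter_B_max_total_neighbor_pairs candidates → Spec_filter_B_max_total_neighbor_pairs candidates (filter_B_max_total_neighbor_pairs candidates)

-- ===== LEMMAS AND PROOFS =====

-- A's diff list equals B's zip-based diff list.
theorem get_neighbors_diff_eq (perm : List Int) :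
    get_neighbors_diff perm = (perm.zip perm.tail).map (fun p => |p.1 - p.2|) := by
  unfold get_neighbors_diff
  rw [PySem.List.pyRange_one]
  apply List.ext_getElem
  · simp [List.length_zip]
  · intro i h1 h2
    have hi1 : i + 1 < perm.length := by
      simp at h1; omega
    simp only [List.getElem_map, List.getElem_range, List.getElem_zip, List.getElem_tail]
    rw [show (0:Int) + (i:Int) = ((i:Nat):Int) by ring]
    rw [show ((i:Int) + 1) = (((i+1:Nat)):Int) by push_cast; ring,
       PySem.List.pyGetD_natCast, PySem.List.pyGetD_natCast,
       List.getD_eq_getElem _ _ (by omega), List.getD_eq_getElem _ _ hi1]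

theorem scoreB_nonneg (perm : List Int) : 0 ≤ pvScoreB perm := by
  unfold pvScoreB
  apply List.sum_nonneg
  intro x hx
  obtain ⟨p, _, rfl⟩ := List.mem_map.mp hx
  exact abs_nonneg _

-- invariant of A's loop
theorem foldA_inv (l : List (List Int)) :
    l.foldl
      (fun (st : Int × List (List Int)) perm =>
        let diffs := get_neighbors_diff perm
        let total_diff := diffs.sum
        if total_diff > st.1 then (total_diff, [perm])
        else if total_diff = st.1 then (st.1, st.2 ++ [perm])
        else st)
      (-1, [])
    = (l.foldl (fun acc p => max acc (pvScoreB p)) (-1),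
       l.filter (fun p => decide (pvScoreB p = l.foldl (fun acc p => max acc (pvScoreB p)) (-1)))) := by
  induction l using List.reverseRecOn with
  | nil => rfl
  | append_singleton l x ih =>
    have hsum : (get_neighbors_diff x).sum = pvScoreB x := by
      rw [get_neighbors_diff_eq]; rfl
    have hub : ∀ p ∈ l, pvScoreB p ≤ l.foldl (fun acc p => max acc (pvScoreB p)) (-1) :=
      (PySem.List.le_foldl_max_int l pvScoreB (-1)).2
    set b := l.foldl (fun acc p => max acc (pvScoreB p)) (-1) with hb
    rw [List.foldl_append, List.foldl_append, ih]
    simp only [List.foldl_cons, List.foldl_nil, hsum, List.filter_append]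
    by_cases h1 : pvScoreB x > b
    · have hmax : max b (pvScoreB x) = pvScoreB x := by omega
      rw [if_pos h1]; simp only [← hb, hmax]
      have hnil : l.filter (fun p => decide (pvScoreB p = pvScoreB x)) = [] := by
        apply List.filter_eq_nil_iff.mpr
        intro p hp
        have := hub p hp
        simp; omega
      simp [hnil]
    · rw [if_neg h1]
      by_cases h2 : pvScoreB x = b
      · have hmax : max b (pvScoreB x) = b := by omega
        rw [if_pos h2]; simp only [← hb, hmax]
        simp [h2]
      · have hmax : max b (pvScoreB x) = b := by
          rcases lt_or_ge (pvScoreB x) b with h | h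
          · omega
          · exact absurd (le_antisymm (not_lt.mp h1) h) h2
        rw [if_neg h2]; simp only [← hb, hmax]
        simp [h2]

theorem zip_filter_map (l : List (List Int)) (m : Int) :
    ((l.zip (l.map pvScoreB)).filter (fun p => decide (p.2 = m))).map Prod.fst
      = l.filter (fun p => decide (pvScoreB p = m)) := by
  induction l with
  | nil => rfl
  | cons x t ih =>
    simp only [List.map_cons, List.zip_cons_cons, List.filter_cons]
    by_cases h : pvScoreB x = m <;> simp [h, ih]

-- ===== VERDICT (by name: the statement is the Claim_ definition above) =====
theorem filter_B_max_total_neighbor_pairs_spec : Claim_equal_filter_B_max_total_neighbor_pairs := by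
  intro candidates _
  show filter_B_max_total_neighbor_pairs candidates = filter_B_max_total_neighbor_pairs_alt candidates
  unfold filter_B_max_total_neighbor_pairs filter_B_max_total_neighbor_pairs_alt
  rw [foldA_inv]
  cases candidates with
  | nil => rfl
  | cons c t =>
    simp only [List.map_cons, PySem.List.max?_id_cons]
    have hm : (c :: t).foldl (fun acc p => max acc (pvScoreB p)) (-1)
        = (t.map pvScoreB).foldl max (pvScoreB c) := by
      rw [List.foldl_map, List.foldl_cons, max_eq_right]
      linarith [scoreB_nonneg c]
    rw [hm, ← List.map_cons, zip_filter_map]
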